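-- pv_equiv track=rewrite | github.com/vamsidhar1198/DA-in-python | mystrings.py | isaldigit
-- ===== SOURCE A (Python) =====
-- def isaldigit(x):
--     a=0
--     b=0
--     for i in x:
--         if (ord(i)>=65 and ord(i)<=90) or (ord(i)>=97 and ord(i)<=122) : a+=1
--         elif (ord(i)>=48 and ord(i)<=57):b+=1
--     if a>=1 and b>=1 and (a+b)==len(x):return True
--     else:return False
-- ===== SOURCE B (Python) =====
-- def isaldigit(x):
--     def is_letter(c):
--         return 'A' <= c <= 'Z' or 'a' <= c <= 'z'
--     def is_digit(c):
--         return '0' <= c <= '9'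
--     return (all(is_letter(c) or is_digit(c) for c in x)
--             and any(is_letter(c) for c in x)
--             and any(is_digit(c) for c in x))
-- ===== Notes on version B (the rewrite author's own statement) =====
-- stated objective: simpler
-- what changed: Replaces the counter-accumulating single pass and arithmetic final test with three independent short-circuiting predicate passes (all alphanumeric, any letter, any digit) over explicit ASCII range checks.
import Mathlib
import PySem

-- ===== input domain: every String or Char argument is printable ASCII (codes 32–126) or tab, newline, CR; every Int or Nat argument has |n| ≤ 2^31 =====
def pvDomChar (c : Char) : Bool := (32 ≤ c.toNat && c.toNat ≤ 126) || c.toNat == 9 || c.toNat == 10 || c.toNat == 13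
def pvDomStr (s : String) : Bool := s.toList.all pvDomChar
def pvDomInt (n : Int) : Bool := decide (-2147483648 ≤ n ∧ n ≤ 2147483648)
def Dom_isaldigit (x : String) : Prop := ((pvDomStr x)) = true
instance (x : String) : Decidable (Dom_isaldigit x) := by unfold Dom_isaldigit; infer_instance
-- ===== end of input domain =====

-- B replaces A's counter-accumulating pass with three independent short-circuiting predicate passes (simpler).

-- ===== PORT A =====
-- single pass accumulating letter count a and digit count b, then arithmetic test
def isaldigit (x : String) : Bool :=
  let st := x.toList.foldl (fun (ab : Int × Int) i =>
    if (65 ≤ i.toNat ∧ i.toNat ≤ 90) ∨ (97 ≤ i.toNat ∧ i.toNat ≤ 122) then (ab.1 + 1, ab.2)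
    else if 48 ≤ i.toNat ∧ i.toNat ≤ 57 then (ab.1, ab.2 + 1)
    else ab) (0, 0)
  if st.1 ≥ 1 ∧ st.2 ≥ 1 ∧ st.1 + st.2 = (x.toList.length : Int) then true else false

-- ===== PORT B =====
def pvIsLetter (c : Char) : Bool := (65 ≤ c.toNat && c.toNat ≤ 90) || (97 ≤ c.toNat && c.toNat ≤ 122)
def pvIsDigit (c : Char) : Bool := (48 ≤ c.toNat && c.toNat ≤ 57)
def isaldigit_alt (x : String) : Bool :=
  x.toList.all (fun c => pvIsLetter c || pvIsDigit c)
    && x.toList.any pvIsLetter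
    && x.toList.any pvIsDigit

-- ===== PRECONDITION & SPEC =====
def Spec_isaldigit (x : String) (out : Bool) : Prop := out = isaldigit_alt x
instance (x : String) (out : Bool) : Decidable (Spec_isaldigit x out) := by unfold Spec_isaldigit; infer_instance

-- ===== CLAIM (what is proved, stated in full; the proofs are below) =====
def Claim_equal_isaldigit : Prop := ∀ (x : String), Dom_isaldigit x → Spec_isaldigit x (isaldigit x)

-- ===== LEMMAS AND PROOFS =====

-- A's fold computes the letter count and the digit count
theorem pv_fold_eq (l : List Char) (a b : Int) :
    l.foldl (fun (ab : Int × Int) i =>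
      if (65 ≤ i.toNat ∧ i.toNat ≤ 90) ∨ (97 ≤ i.toNat ∧ i.toNat ≤ 122) then (ab.1 + 1, ab.2)
      else if 48 ≤ i.toNat ∧ i.toNat ≤ 57 then (ab.1, ab.2 + 1)
      else ab) (a, b)
    = (a + (l.countP pvIsLetter : Int), b + (l.countP pvIsDigit : Int)) := by
  induction l generalizing a b with
  | nil => simp
  | cons c l ih =>
    by_cases hL : (65 ≤ c.toNat ∧ c.toNat ≤ 90) ∨ (97 ≤ c.toNat ∧ c.toNat ≤ 122)
    · have hL' : pvIsLetter c = true := by simp [pvIsLetter]; omega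
      have hD' : pvIsDigit c = false := by simp [pvIsDigit]; omega
      simp [List.foldl_cons, hL, ih, hL', hD']
      ring_nf
    · by_cases hD : 48 ≤ c.toNat ∧ c.toNat ≤ 57
      · have hL' : pvIsLetter c = false := by simp [pvIsLetter]; omega
        have hD' : pvIsDigit c = true := by simp [pvIsDigit]; omega
        simp [List.foldl_cons, hL, hD, ih, hL', hD']
        ring_nf
      · have hL' : pvIsLetter c = false := by simp [pvIsLetter]; omega
        have hD' : pvIsDigit c = false := by simp [pvIsDigit]; omega
        simp [List.foldl_cons, hL, hD, ih, hL', hD']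

-- the two counts sum to the length exactly when every char is letter-or-digit
theorem pv_sum_eq_iff_all (l : List Char) :
    (l.countP pvIsLetter + l.countP pvIsDigit = l.length)
      ↔ l.all (fun c => pvIsLetter c || pvIsDigit c) = true := by
  induction l with
  | nil => simp
  | cons c l ih =>
    have hle : l.countP pvIsLetter + l.countP pvIsDigit ≤ l.length := by
      clear ih
      induction l with
      | nil => simp
      | cons d l ih2 =>
        by_cases hL : pvIsLetter d = true
        · have hD : pvIsDigit d = false := by
            revert hL; simp [pvIsLetter, pvIsDigit]; omega
          simp [hL, hD]; omega
        · simp at hL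
          simp [List.countP_cons, hL]
          by_cases hD : pvIsDigit d = true <;> simp [hD] at * <;> omega
    by_cases hL : pvIsLetter c = true
    · have hD : pvIsDigit c = false := by
        revert hL; simp [pvIsLetter, pvIsDigit]; omega
      simp [List.countP_cons, hL, hD, ← ih]; omega
    · simp at hL
      by_cases hD : pvIsDigit c = true
      · simp [List.countP_cons, hL, hD, ← ih]; omega
      · simp at hD
        simp [List.countP_cons, hL, hD, ← ih]; omega

-- ===== VERDICT (by name: the statement is the Claim_ definition above) =====
theorem isaldigit_spec : Claim_equal_isaldigit := by
  intro x _
  unfold Spec_isaldigit isaldigit isaldigit_alt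
  rw [pv_fold_eq]
  simp only []
  have hsum := pv_sum_eq_iff_all x.toList
  have hanyL : x.toList.any pvIsLetter = true ↔ 0 < x.toList.countP pvIsLetter := by
    simp [List.any_eq_true, List.countP_pos_iff]
  have hanyD : x.toList.any pvIsDigit = true ↔ 0 < x.toList.countP pvIsDigit := by
    simp [List.any_eq_true, List.countP_pos_iff]
  show (if (0:Int) + _ ≥ 1 ∧ (0:Int) + _ ≥ 1 ∧ (0:Int) + _ + ((0:Int) + _) = _ then true else false) = _
  split_ifs with h
  · obtain ⟨h1, h2, h3⟩ := h
    have hL : 0 < x.toList.countP pvIsLetter := by omega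
    have hD : 0 < x.toList.countP pvIsDigit := by omega
    have hall : x.toList.countP pvIsLetter + x.toList.countP pvIsDigit = x.toList.length := by omega
    rw [hsum] at hall
    simp [hall, hanyL.mpr hL, hanyD.mpr hD]
  · push Not at h
    symm
    by_contra hc
    rw [Bool.not_eq_false] at hc
    simp only [Bool.and_eq_true] at hc
    obtain ⟨⟨hall, haL⟩, haD⟩ := hc
    have hL := hanyL.mp haL
    have hD := hanyD.mp haD
    have := hsum.mpr hall
    omega
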